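-- pv_equiv track=rewrite | github.com/jondye/adventofcode2021 | day9.py | floor_iterator
-- ===== SOURCE A (Python) =====
-- from itertools import chain
--
-- def floor_iterator(heightmap):
--     width = len(heightmap[0])
--     heightlist = [item for sublist in heightmap for item in sublist]
--     north = ([99] * width) + heightlist
--     south = heightlist[width:] + ([99] * width)
--     east = chain.from_iterable(sublist[1:] + [99] for sublist in heightmap)
--     west = chain.from_iterable([99] + sublist[:-1] for sublist in heightmap)
--     return zip(heightlist, north, east, south, west)
-- ===== SOURCE B (Python) =====
-- def floor_iterator(heightmap):
--     width = len(heightmap[0])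
--     queue = [99] * width                # lag buffer: the height seen `width` cells ago is the north neighbor
--     south = (h for row in heightmap for h in row)
--     for _ in range(width):              # look-ahead: the height `width` cells ahead is the south neighbor
--         next(south, None)
--     ew = (p for row in heightmap for p in zip(row[1:] + [99], [99] + row[:-1]))
--     for row in heightmap:
--         for h in row:
--             e, w = next(ew, (99, 99))
--             queue.append(h)
--             yield (h, queue.pop(0), e, next(south, 99), w)
-- ===== Notes on version B (the rewrite author's own statement) =====
-- stated objective: alternative
-- what changed: B is a streaming generator making one pass over the cells with a FIFO lag queue (the height width cells back is the north neighbor), a look-ahead iterator advanced width cells for the south neighbor, and a paired east/west iterator, instead of A's materialization of five shifted/99-padded lists zipped together.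
import Mathlib
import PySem

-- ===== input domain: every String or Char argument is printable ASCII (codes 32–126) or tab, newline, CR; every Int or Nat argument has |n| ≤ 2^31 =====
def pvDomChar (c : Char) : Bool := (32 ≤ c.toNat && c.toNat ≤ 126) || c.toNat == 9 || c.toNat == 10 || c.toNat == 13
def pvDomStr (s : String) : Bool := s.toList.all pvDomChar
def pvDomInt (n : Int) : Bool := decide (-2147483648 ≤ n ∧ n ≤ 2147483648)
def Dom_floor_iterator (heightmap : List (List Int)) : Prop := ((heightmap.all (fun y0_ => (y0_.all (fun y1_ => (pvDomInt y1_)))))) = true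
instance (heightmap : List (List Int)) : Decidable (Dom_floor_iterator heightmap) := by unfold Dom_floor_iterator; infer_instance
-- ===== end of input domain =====

-- B streams the cells once through a FIFO lag queue (north = height width cells back), a
-- look-ahead iterator advanced width cells (south) and a paired east/west iterator, instead of
-- A's zip of five materialized shifted/99-padded lists; alternative decomposition, same cost.
-- Python A returns a zip object and B a generator; both are ported as the list of produced tuples.

-- ===== PORT A =====
-- zip(a, b, c, d, e): pairwise tuples, truncating at the shortest input
def zip5 : List Int → List Int → List Int → List Int → List Int → List (Int × Int × Int × Int × Int)
  | a :: as, b :: bs, c :: cs, d :: ds, e :: es => (a, b, c, d, e) :: zip5 as bs cs ds es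
  | _, _, _, _, _ => []

def floor_iterator (heightmap : List (List Int)) : List (Int × Int × Int × Int × Int) :=
  let width := (heightmap.headD []).length  -- len(heightmap[0]); heightmap ≠ [] by Pre_
  let heightlist := heightmap.flatten
  let north := List.replicate width 99 ++ heightlist
  let south := heightlist.drop width ++ List.replicate width 99
  let east := (heightmap.map (fun sublist => sublist.drop 1 ++ [99])).flatten
  let west := (heightmap.map (fun sublist => 99 :: sublist.dropLast)).flatten
  zip5 heightlist north east south west

-- ===== PORT B =====
-- Source B's generators over (h for row … for h in row) and the zipped east/west pairs are the
-- flattened lists consumed front to back (next = head + tail, with the same defaults); the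
-- queue and the two iterator remainders are the fold's state, the yields are the accumulator
def floor_iterator_alt (heightmap : List (List Int)) : List (Int × Int × Int × Int × Int) :=
  let width := (heightmap.headD []).length
  let south0 := heightmap.flatten.drop width   -- next(south, None) done width times
  let ew0 := (heightmap.map (fun row => (row.drop 1 ++ [99]).zip (99 :: row.dropLast))).flatten
  let res := heightmap.foldl (fun st row => row.foldl
      (fun (st : List Int × List Int × List (Int × Int) × List (Int × Int × Int × Int × Int)) h =>
        ((st.1 ++ [h]).tail, st.2.1.tail, st.2.2.1.tail,   -- append h + pop(0); the two next()s
          st.2.2.2 ++ [(h, (st.1 ++ [h]).headD 99, (st.2.2.1.headD (99, 99)).1,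
            st.2.1.headD 99, (st.2.2.1.headD (99, 99)).2)])) st)
    (List.replicate width 99, south0, ew0, ([] : List (Int × Int × Int × Int × Int)))
  res.2.2.2

-- ===== PRECONDITION & SPEC =====
-- Pre_ excludes only the empty grid, on which A raises IndexError at heightmap[0] (B raises too)
def Pre_floor_iterator (heightmap : List (List Int)) : Prop := heightmap ≠ []
instance (heightmap : List (List Int)) : Decidable (Pre_floor_iterator heightmap) := by
  unfold Pre_floor_iterator; infer_instance
def pvWitness_floor_iterator : List (List Int) := [[1, 2], [3, 4]]

def Spec_floor_iterator (heightmap : List (List Int)) (out : List (Int × Int × Int × Int × Int)) : Prop := out = floor_iterator_alt heightmap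
instance (heightmap : List (List Int)) (out : List (Int × Int × Int × Int × Int)) : Decidable (Spec_floor_iterator heightmap out) := by unfold Spec_floor_iterator; infer_instance

-- ===== CLAIM (what is proved, stated in full; the proofs are below) =====
def Claim_equal_floor_iterator : Prop := ∀ (heightmap : List (List Int)), Dom_floor_iterator heightmap → Pre_floor_iterator heightmap → Spec_floor_iterator heightmap (floor_iterator heightmap)

-- ===== LEMMAS AND PROOFS =====

-- the stream of tuples B's inner loop body produces from queue q, south rest s and east/west rest ew
def outB : List Int → List Int → List Int → List (Int × Int) → List (Int × Int × Int × Int × Int)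
  | [], _, _, _ => []
  | h :: t, q, s, ew =>
    (h, ((q ++ [h]).headD 99), (ew.headD (99, 99)).1, s.headD 99, (ew.headD (99, 99)).2)
      :: outB t (q ++ [h]).tail s.tail ew.tail

-- B's nested foldl over the rows appends outB of the flattened cells to the accumulator
theorem foldl_eq_outB :
    ∀ (xs : List Int) (q s : List Int) (ew : List (Int × Int))
      (acc : List (Int × Int × Int × Int × Int)),
      xs.foldl
        (fun (st : List Int × List Int × List (Int × Int) × List (Int × Int × Int × Int × Int)) h =>
          ((st.1 ++ [h]).tail, st.2.1.tail, st.2.2.1.tail,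
            st.2.2.2 ++ [(h, (st.1 ++ [h]).headD 99, (st.2.2.1.headD (99, 99)).1,
              st.2.1.headD 99, (st.2.2.1.headD (99, 99)).2)])) (q, s, ew, acc)
      = ((q ++ xs).drop xs.length, s.drop xs.length, ew.drop xs.length, acc ++ outB xs q s ew) := by
  intro xs
  induction xs with
  | nil => intro q s ew acc; simp [outB]
  | cons h t ih =>
    intro q s ew acc
    simp only [List.foldl_cons, outB, ih]
    have hq : (q ++ [h]).tail ++ t = (q ++ h :: t).tail := by cases q <;> simp
    simp only [Prod.mk.injEq]
    refine ⟨?_, ?_, ?_, by simp⟩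
    · rw [hq, ← List.drop_one, List.drop_drop, List.length_cons, Nat.add_comm 1 t.length]
    · rw [← List.drop_one, List.drop_drop, List.length_cons, Nat.add_comm 1 t.length]
    · rw [← List.drop_one, List.drop_drop, List.length_cons, Nat.add_comm 1 t.length]

-- zipping two flattenings whose pieces have pairwise equal lengths is the flattening of the zips
theorem zip_flatten (f g : List Int → List Int) :
    ∀ rows : List (List Int), (∀ r ∈ rows, (f r).length = (g r).length) →
      ((rows.map f).flatten).zip ((rows.map g).flatten)
        = (rows.map (fun r => (f r).zip (g r))).flatten := by
  intro rows
  induction rows with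
  | nil => intro _; simp
  | cons r rest ih =>
    intro h
    simp only [List.map_cons, List.flatten_cons]
    rw [List.zip_append (h r (by simp)), ih (fun r hr => h r (by simp [hr]))]

-- the stream consumption equals A's zip of the padded streams
theorem outB_eq_zip5 :
    ∀ (xs q s E W : List Int) (k : Nat),
      xs.length ≤ E.length → xs.length ≤ W.length → xs.length ≤ s.length + k →
      zip5 xs (q ++ xs) E (s ++ List.replicate k 99) W = outB xs q s (E.zip W) := by
  intro xs
  induction xs with
  | nil =>
    intro q s E W k _ _ _
    cases q ++ ([] : List Int) <;> cases E <;> cases s ++ List.replicate k (99 : Int) <;>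
      cases W <;> rfl
  | cons h t ih =>
    intro q s E W k hE hW hS
    cases E with
    | nil => simp at hE
    | cons e E' =>
      cases W with
      | nil => simp at hW
      | cons wv W' =>
        simp only [List.length_cons, Nat.succ_le_succ_iff] at hE hW
        cases q with
        | nil =>
          cases s with
          | nil =>
            cases k with
            | zero => simp at hS
            | succ k' =>
              simp only [List.nil_append, List.replicate_succ, List.zip_cons_cons, zip5, outB]
              congr 1
              have := ih [] [] E' W' k' hE hW (by simp at hS ⊢; omega)
              simpa using this
          | cons sh st =>
            simp only [List.nil_append, List.zip_cons_cons, List.cons_append, zip5, outB]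
            congr 1
            have := ih [] st E' W' k hE hW (by simp at hS ⊢; omega)
            simpa using this
        | cons qh qt =>
          cases s with
          | nil =>
            cases k with
            | zero => simp at hS
            | succ k' =>
              simp only [List.cons_append, List.nil_append, List.replicate_succ,
                List.zip_cons_cons, zip5, outB]
              congr 1
              have := ih (qt ++ [h]) [] E' W' k' hE hW (by simp at hS ⊢; omega)
              simpa using this
          | cons sh st =>
            simp only [List.cons_append, List.zip_cons_cons, zip5, outB]
            congr 1
            have := ih (qt ++ [h]) st E' W' k hE hW (by simp at hS ⊢; omega)
            simpa using this

theorem east_len_ge (heightmap : List (List Int)) :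
    heightmap.flatten.length
      ≤ ((heightmap.map (fun sublist => sublist.drop 1 ++ [99])).flatten).length := by
  induction heightmap with
  | nil => simp
  | cons row rest ih =>
    simp only [List.map_cons, List.flatten_cons, List.length_append, List.length_cons,
      List.length_drop, List.length_nil] at ih ⊢
    omega

theorem west_len_ge (heightmap : List (List Int)) :
    heightmap.flatten.length
      ≤ ((heightmap.map (fun sublist => 99 :: sublist.dropLast)).flatten).length := by
  induction heightmap with
  | nil => simp
  | cons row rest ih =>
    simp only [List.map_cons, List.flatten_cons, List.length_append, List.length_cons,
      List.length_dropLast] at ih ⊢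
    omega

-- B's nested per-row folds are one fold over the flattened cells
theorem foldl_flatten' {σ : Type} (f : σ → Int → σ) (rows : List (List Int)) (init : σ) :
    rows.foldl (fun st row => row.foldl f st) init = (rows.flatten).foldl f init := by
  induction rows generalizing init with
  | nil => simp
  | cons r rest ih => simp [List.foldl_append, ih]

-- ===== VERDICT (by name: the statement is the Claim_ definition above) =====
theorem floor_iterator_spec : Claim_equal_floor_iterator := by
  intro hm _ _
  unfold Spec_floor_iterator
  simp only [floor_iterator, floor_iterator_alt]
  rw [foldl_flatten', foldl_eq_outB]
  simp only [List.nil_append]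
  rw [← zip_flatten (fun row => row.drop 1 ++ [99]) (fun row => (99 : Int) :: row.dropLast) hm
    (by intro r _; simp)]
  exact outB_eq_zip5 hm.flatten _ _ _ _ _ (east_len_ge hm) (west_len_ge hm) (by simp; omega)
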